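-- pv_equiv track=rewrite | github.com/jesusvilela/connection_laplacian_lean | findings/round6/stage5_negator_B/fuzz.py | is_balanced_on_component
-- ===== SOURCE A (Python) =====
-- from collections import defaultdict
--
-- def is_balanced_on_component(comp, edges_in_comp, W):
--     adj = defaultdict(list)
--     for u, v in edges_in_comp:
--         adj[u].append(v)
--         adj[v].append(u)
--     color = {}
--     root = next(iter(comp))
--     color[root] = 0
--     stack = [root]
--     while stack:
--         u = stack.pop()
--         for w in adj[u]:
--             e = (u, w) if u < w else (w, u)
--             flip = 1 if e in W else 0
--             expected = color[u] ^ flip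
--             if w not in color:
--                 color[w] = expected
--                 stack.append(w)
--             elif color[w] != expected:
--                 return False
--     return True
-- ===== SOURCE B (Python) =====
-- def is_balanced_on_component(comp, edges_in_comp, W):
--     root = next(iter(comp))
--     color = {root: 0}
--     changed = True
--     while changed:
--         changed = False
--         for u, v in edges_in_comp:
--             flip = 1 if ((u, v) if u < v else (v, u)) in W else 0
--             if u in color and v not in color:
--                 color[v] = color[u] ^ flip
--                 changed = True
--             elif v in color and u not in color:
--                 color[u] = color[v] ^ flip
--                 changed = True
--     for u, v in edges_in_comp:
--         if u in color and v in color: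
--             flip = 1 if ((u, v) if u < v else (v, u)) in W else 0
--             if color[u] ^ color[v] != flip:
--                 return False
--     return True
-- ===== Notes on version B (the rewrite author's own statement) =====
-- stated objective: alternative
-- what changed: Replaced the stack-based DFS 2-coloring over an adjacency-list dict by Bellman-Ford-style edge relaxation: repeatedly sweep the edge list propagating parities to a fixpoint, then a single verification pass over all edges; no adjacency structure and no early exit during propagation.
import Mathlib
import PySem

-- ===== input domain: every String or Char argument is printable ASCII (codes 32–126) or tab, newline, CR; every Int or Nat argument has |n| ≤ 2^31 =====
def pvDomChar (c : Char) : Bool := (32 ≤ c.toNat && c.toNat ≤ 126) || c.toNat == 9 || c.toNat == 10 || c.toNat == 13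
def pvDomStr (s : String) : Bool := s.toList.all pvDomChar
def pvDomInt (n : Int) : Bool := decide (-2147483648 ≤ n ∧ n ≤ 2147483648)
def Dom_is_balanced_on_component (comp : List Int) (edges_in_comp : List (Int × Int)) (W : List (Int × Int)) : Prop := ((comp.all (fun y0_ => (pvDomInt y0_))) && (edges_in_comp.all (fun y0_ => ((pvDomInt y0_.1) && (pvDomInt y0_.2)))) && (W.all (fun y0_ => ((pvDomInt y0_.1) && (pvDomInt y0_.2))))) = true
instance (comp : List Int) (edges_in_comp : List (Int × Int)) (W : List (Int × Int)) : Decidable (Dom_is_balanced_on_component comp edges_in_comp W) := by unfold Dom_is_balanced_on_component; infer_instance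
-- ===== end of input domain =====

-- B replaces A's stack-based DFS 2-coloring (adjacency dict + stack) by edge-relaxation to a
-- fixpoint followed by one verification pass over the edges (alternative algorithm, return value only).

-- ===== PORT A =====

-- model of next(iter(comp)) for a CPython set of ints built by inserting the given elements in
-- order: open-addressing table (MINSIZE 8, LINEAR_PROBE 9, perturb probing, growth at fill*5 >=
-- mask*3 to >used*4), first occupied slot; exact for int elements (hash(n)=n, hash(-1)=-2),
-- checked against CPython 3.11
def pvHash (x : Int) : Nat := (Int.emod (if x = -1 then -2 else x) (2 ^ 64)).toNat

-- scan cnt slots from index i: some (some j) = first empty slot j, some none = key present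
def pvScan (table : List (Option Int)) (key : Int) : Nat → Nat → Option (Option Nat)
  | _, 0 => none
  | i, k + 1 =>
    match table.getD i none with
    | none => some (some i)
    | some e => if e = key then some none else pvScan table key (i + 1) k

-- probe sequence: some j = insert at slot j, none = key already present (fuel never runs out:
-- the affine probe recurrence cycles through all slots once perturb is exhausted)
def pvProbe (table : List (Option Int)) (key : Int) : Nat → Nat → Nat → Option Nat
  | 0, _, _ => none
  | fuel + 1, i, perturb =>
    let mask := table.length - 1
    let cnt := if i + 9 ≤ mask then 10 else 1
    match pvScan table key i cnt with
    | some (some j) => some j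
    | some none => none
    | none =>
      let p := perturb >>> 5
      pvProbe table key fuel ((i * 5 + 1 + p) % table.length) p

def pvCleanIns (st : List (Option Int) × Nat) (key : Int) : List (Option Int) × Nat :=
  match pvProbe st.1 key (st.1.length + 64) (pvHash key % st.1.length) (pvHash key) with
  | some j => (st.1.set j (some key), st.2 + 1)
  | none => st

def pvNewSize : Nat → Nat → Nat → Nat
  | 0, cur, _ => cur
  | f + 1, cur, minused => if cur ≤ minused then pvNewSize f (cur * 2) minused else cur

def pvSetResize (old : List (Option Int)) (used : Nat) : List (Option Int) × Nat :=
  old.foldl (fun st e => match e with | none => st | some k => pvCleanIns st k)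
    (List.replicate (pvNewSize (used * 4 + 8) 8 (used * 4)) none, 0)

def pvSetAdd (st : List (Option Int) × Nat) (key : Int) : List (Option Int) × Nat :=
  match pvProbe st.1 key (st.1.length + 64) (pvHash key % st.1.length) (pvHash key) with
  | some j =>
    let t := st.1.set j (some key)
    let fill := st.2 + 1
    if (st.1.length - 1) * 3 ≤ fill * 5 then pvSetResize t fill else (t, fill)
  | none => st

def pvSetFirst (comp : List Int) : Option Int :=
  (comp.foldl pvSetAdd (List.replicate 8 none, 0)).1.findSome? id

-- flip = 1 if ((u,w) if u < w else (w,u)) in W else 0   (identical expression in A and B)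
def pvFlip (W : List (Int × Int)) (u w : Int) : Int :=
  if (if u < w then (u, w) else (w, u)) ∈ W then 1 else 0

-- all vertex occurrences of the edge list (termination measure bookkeeping only)
def pvVerts (edges : List (Int × Int)) : List Int :=
  edges.flatMap (fun p => [p.1, p.2])

-- number of vertices of V not yet colored (termination measure bookkeeping only)
def pvUnc (V : List Int) (c : PySem.Dict Int Int) : Nat :=
  V.countP (fun x => !c.contains x)

theorem pvUnc_insert_le (V : List Int) (c : PySem.Dict Int Int) (w : Int) (v : Int) :
    pvUnc V (c.insert w v) ≤ pvUnc V c := by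
  unfold pvUnc
  apply List.countP_mono_left
  intro x _ hx
  simp only [PySem.Dict.contains_insert, Bool.not_eq_true', Bool.or_eq_false_iff] at hx ⊢
  exact hx.2

theorem pvUnc_insert_lt (V : List Int) (c : PySem.Dict Int Int) (w : Int) (v : Int)
    (hw : w ∈ V) (hc : c.contains w = false) :
    pvUnc V (c.insert w v) < pvUnc V c := by
  unfold pvUnc
  induction V with
  | nil => simp at hw
  | cons a V ih =>
    rcases List.mem_cons.1 hw with rfl | hw
    · simp only [List.countP_cons]
      have h1 : (!(c.insert w v).contains w) = false := by
        simp [PySem.Dict.contains_insert_self]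
      have h2 : (!c.contains w) = true := by simp [hc]
      rw [h1, h2]
      have := pvUnc_insert_le V c w v
      unfold pvUnc at this
      simp only [Bool.false_eq_true, if_false, if_true]
      omega
    · simp only [List.countP_cons]
      have := ih hw
      have hle : ((!(c.insert w v).contains a).toNat : Nat) ≤ (!c.contains a).toNat := by
        simp only [PySem.Dict.contains_insert]
        cases hca : c.contains a <;> cases haw : a == w <;> simp [haw]
      rcases Nat.le_iff_lt_or_eq.1 hle with h' | h'
      · have h4 : ((if (!(c.insert w v).contains a) = true then 1 else 0) : Nat) ≤ (if (!c.contains a) = true then 1 else 0) := by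
          cases h5 : (!(c.insert w v).contains a) <;> cases h6 : (!c.contains a) <;> simp_all
        omega
      · rw [show ((if (!(c.insert w v).contains a) = true then 1 else 0) : Nat) = (!(c.insert w v).contains a).toNat from by cases (!(c.insert w v).contains a) <;> simp,
           show ((if (!c.contains a) = true then 1 else 0) : Nat) = (!c.contains a).toNat from by cases (!c.contains a) <;> simp]
        omega

-- adj = defaultdict(list); for u, v in edges: adj[u].append(v); adj[v].append(u)
def pvAdj (edges : List (Int × Int)) : PySem.Dict Int (List Int) :=
  edges.foldl
    (fun d p => (d.modify p.1 [] (· ++ [p.2])).modify p.2 [] (· ++ [p.1]))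
    PySem.Dict.empty

-- neighbours recorded by pvAdj come from the edge list (used for the termination argument of pvALoop)
theorem pv_mem_getD_modify_append (d : PySem.Dict Int (List Int)) (k x u w : Int)
    (h : w ∈ (d.modify k [] (· ++ [x])).getD u []) : w ∈ d.getD u [] ∨ w = x := by
  rw [PySem.Dict.getD_modify] at h
  split_ifs at h with h1
  · rcases List.mem_append.1 h with h2 | h2
    · subst h1; exact Or.inl h2
    · right; simpa using h2
  · exact Or.inl h

theorem pvAdj_foldl_mem (edges : List (Int × Int)) (d : PySem.Dict Int (List Int)) (u w : Int)
    (h : w ∈ (edges.foldl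
      (fun d p => (d.modify p.1 [] (· ++ [p.2])).modify p.2 [] (· ++ [p.1])) d).getD u []) :
    w ∈ d.getD u [] ∨ w ∈ pvVerts edges := by
  induction edges generalizing d with
  | nil => exact Or.inl h
  | cons p edges ih =>
    rcases ih _ h with h' | h'
    · rcases pv_mem_getD_modify_append _ _ _ _ _ h' with h2 | h2
      · rcases pv_mem_getD_modify_append _ _ _ _ _ h2 with h3 | h3
        · exact Or.inl h3
        · right; simp only [pvVerts, List.flatMap_cons, List.mem_append, List.mem_cons]; tauto
      · right; simp only [pvVerts, List.flatMap_cons, List.mem_append, List.mem_cons]; tauto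
    · right; simp only [pvVerts, List.flatMap_cons, List.mem_append, List.mem_cons] at h' ⊢
      tauto

theorem pvAdj_mem (edges : List (Int × Int)) (u w : Int)
    (h : w ∈ (pvAdj edges).getD u []) : w ∈ pvVerts edges := by
  rcases pvAdj_foldl_mem edges PySem.Dict.empty u w h with h' | h'
  · simp [PySem.Dict.getD_empty] at h'
  · exact h'

-- the body of 'for w in adj[u]: …' with early return False = none
def pvAInner (W : List (Int × Int)) (u : Int) :
    List Int → PySem.Dict Int Int → List Int → Option (PySem.Dict Int Int × List Int)
  | [], c, s => some (c, s)
  | w :: ws, c, s =>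
    let flip := pvFlip W u w
    let expected := PySem.Int.bxor (c.getD u 0) flip
    if c.contains w = false then
      pvAInner W u ws (c.insert w expected) (s ++ [w])
    else if c.getD w 0 ≠ expected then none
    else pvAInner W u ws c s

-- the inner loop only shrinks the termination measure (used by decreasing_by of pvALoop)
theorem pvAInner_measure (W : List (Int × Int)) (u : Int) (V : List Int) :
    ∀ (ws : List Int) (c : PySem.Dict Int Int) (s : List Int)
      (c' : PySem.Dict Int Int) (s' : List Int),
      (∀ w ∈ ws, w ∈ V) → pvAInner W u ws c s = some (c', s') →
      2 * pvUnc V c' + s'.length ≤ 2 * pvUnc V c + s.length := by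
  intro ws
  induction ws with
  | nil => intro c s c' s' _ h; simp only [pvAInner] at h; cases h; omega
  | cons w ws ih =>
    intro c s c' s' hV h
    simp only [pvAInner] at h
    split_ifs at h with h1 h2
    · have := ih _ _ _ _ (fun x hx => hV x (List.mem_cons_of_mem _ hx)) h
      have hlt := pvUnc_insert_lt V c w (PySem.Int.bxor (c.getD u 0) (pvFlip W u w)) (hV w (List.mem_cons_self ..)) h1
      simp only [List.length_append, List.length_cons, List.length_nil] at this ⊢
      omega
    · exact (ih _ _ _ _ (fun x hx => hV x (List.mem_cons_of_mem _ hx)) h)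

-- while stack: u = stack.pop(); for w in adj[u]: …
def pvALoop (W : List (Int × Int)) (adj : PySem.Dict Int (List Int)) (V : List Int)
    (hadj : ∀ u w, w ∈ adj.getD u [] → w ∈ V)
    (c : PySem.Dict Int Int) (s : List Int) : Bool :=
  if h : s = [] then true
  else
    let u := s.getLast h
    let s1 := s.dropLast
    match hm : pvAInner W u (adj.getD u []) c s1 with
    | none => false
    | some (c', s') => pvALoop W adj V hadj c' s'
termination_by 2 * pvUnc V c + s.length
decreasing_by
  have := pvAInner_measure W u V (adj.getD u []) c s1 c' s' (fun w hw => hadj u w hw) hm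
  have hlen : s1.length = s.length - 1 := by simp [s1, List.length_dropLast]
  have hpos : 0 < s.length := List.length_pos_iff.mpr h
  omega

def is_balanced_on_component (comp : List Int) (edges_in_comp : List (Int × Int)) (W : List (Int × Int)) : Bool :=
  let adj := pvAdj edges_in_comp
  match pvSetFirst comp with
  | none => true  -- Python raises StopIteration here; excluded by Pre_
  | some root =>
    pvALoop W adj (pvVerts edges_in_comp) (fun u w hw => pvAdj_mem edges_in_comp u w hw)
      (PySem.Dict.empty.insert root 0) [root]

-- ===== PORT B =====

-- one sweep of 'for u, v in edges_in_comp: …' returning (color, changed)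
def pvBStep (W : List (Int × Int)) (st : PySem.Dict Int Int × Bool) (p : Int × Int) :
    PySem.Dict Int Int × Bool :=
  let flip := pvFlip W p.1 p.2
  if st.1.contains p.1 && !st.1.contains p.2 then
    (st.1.insert p.2 (PySem.Int.bxor (st.1.getD p.1 0) flip), true)
  else if st.1.contains p.2 && !st.1.contains p.1 then
    (st.1.insert p.1 (PySem.Int.bxor (st.1.getD p.2 0) flip), true)
  else st

def pvBPass (W : List (Int × Int)) (edges : List (Int × Int)) (c : PySem.Dict Int Int) :
    PySem.Dict Int Int × Bool :=
  edges.foldl (pvBStep W) (c, false)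

-- a sweep that reports a change has strictly fewer uncolored vertices (termination of pvBLoop)
theorem pvBPass_foldl_measure (W : List (Int × Int)) (V : List Int) :
    ∀ (l : List (Int × Int)) (c : PySem.Dict Int Int) (b : Bool),
      (∀ p ∈ l, p.1 ∈ V ∧ p.2 ∈ V) →
      pvUnc V (l.foldl (pvBStep W) (c, b)).1 ≤ pvUnc V c
      ∧ ((l.foldl (pvBStep W) (c, b)).2 = true → b = true ∨
          pvUnc V (l.foldl (pvBStep W) (c, b)).1 < pvUnc V c) := by
  intro l
  induction l with
  | nil =>
    intro c b _
    exact ⟨le_refl _, fun h => Or.inl h⟩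
  | cons p l ih =>
    intro c b hV
    have hVl : ∀ q ∈ l, q.1 ∈ V ∧ q.2 ∈ V := fun q hq => hV q (List.mem_cons_of_mem _ hq)
    have hp := hV p (List.mem_cons_self ..)
    simp only [List.foldl_cons]
    by_cases h1 : (c.contains p.1 && !c.contains p.2) = true
    · rw [show pvBStep W (c, b) p = (c.insert p.2 (PySem.Int.bxor (c.getD p.1 0) (pvFlip W p.1 p.2)), true) from by
        simp [pvBStep, h1]]
      simp only [Bool.and_eq_true, Bool.not_eq_true'] at h1
      have hlt := pvUnc_insert_lt V c p.2 (PySem.Int.bxor (c.getD p.1 0) (pvFlip W p.1 p.2)) hp.2 h1.2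
      rcases ih (c.insert p.2 (PySem.Int.bxor (c.getD p.1 0) (pvFlip W p.1 p.2))) true hVl with ⟨hle, _⟩
      exact ⟨by omega, fun _ => by right; omega⟩
    · by_cases h2 : (c.contains p.2 && !c.contains p.1) = true
      · rw [show pvBStep W (c, b) p = (c.insert p.1 (PySem.Int.bxor (c.getD p.2 0) (pvFlip W p.1 p.2)), true) from by
          simp [pvBStep, h1, h2]]
        simp only [Bool.and_eq_true, Bool.not_eq_true'] at h2
        have hlt := pvUnc_insert_lt V c p.1 (PySem.Int.bxor (c.getD p.2 0) (pvFlip W p.1 p.2)) hp.1 h2.2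
        rcases ih (c.insert p.1 (PySem.Int.bxor (c.getD p.2 0) (pvFlip W p.1 p.2))) true hVl with ⟨hle, _⟩
        exact ⟨by omega, fun _ => by right; omega⟩
      · rw [show pvBStep W (c, b) p = (c, b) from by simp [pvBStep, h1, h2]]
        exact ih c b hVl

theorem pvBPass_measure (W : List (Int × Int)) (edges : List (Int × Int)) (c : PySem.Dict Int Int)
    (h : (pvBPass W edges c).2 = true) :
    pvUnc (pvVerts edges) (pvBPass W edges c).1 < pvUnc (pvVerts edges) c := by
  have hV : ∀ p ∈ edges, p.1 ∈ pvVerts edges ∧ p.2 ∈ pvVerts edges := by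
    intro p hp
    constructor <;> · simp only [pvVerts, List.mem_flatMap]; exact ⟨p, hp, by simp⟩
  rcases pvBPass_foldl_measure W (pvVerts edges) edges c false hV with ⟨_, hch⟩
  rcases hch h with h' | h'
  · cases h'
  · exact h'

-- while changed: changed = False; one sweep
def pvBLoop (W : List (Int × Int)) (edges : List (Int × Int)) (c : PySem.Dict Int Int) :
    PySem.Dict Int Int :=
  let r := pvBPass W edges c
  if h : r.2 = true then pvBLoop W edges r.1 else r.1
termination_by pvUnc (pvVerts edges) c
decreasing_by exact pvBPass_measure W edges c h

-- final verification pass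
def pvBCheck (W : List (Int × Int)) (edges : List (Int × Int)) (c : PySem.Dict Int Int) : Bool :=
  edges.all (fun p =>
    if c.contains p.1 && c.contains p.2 then
      decide (PySem.Int.bxor (c.getD p.1 0) (c.getD p.2 0) = pvFlip W p.1 p.2)
    else true)

def is_balanced_on_component_alt (comp : List Int) (edges_in_comp : List (Int × Int)) (W : List (Int × Int)) : Bool :=
  match pvSetFirst comp with
  | none => true  -- Python raises StopIteration here; excluded by Pre_
  | some root =>
    pvBCheck W edges_in_comp (pvBLoop W edges_in_comp (PySem.Dict.empty.insert root 0))

-- ===== PRECONDITION & SPEC =====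
-- Pre_ excludes only the empty comp, on which Python A raises StopIteration (next(iter(comp))).
def Pre_is_balanced_on_component (comp : List Int) (edges_in_comp : List (Int × Int)) (W : List (Int × Int)) : Prop := comp ≠ []
instance (comp : List Int) (edges_in_comp : List (Int × Int)) (W : List (Int × Int)) : Decidable (Pre_is_balanced_on_component comp edges_in_comp W) := by unfold Pre_is_balanced_on_component; infer_instance

def pvWitness_is_balanced_on_component : List Int × (List (Int × Int)) × (List (Int × Int)) :=
  ([0, 1, 2], [(0, 1), (1, 2), (0, 2)], [(0, 1)])

def Spec_is_balanced_on_component (comp : List Int) (edges_in_comp : List (Int × Int)) (W : List (Int × Int)) (out : Bool) : Prop := out = is_balanced_on_component_alt comp edges_in_comp W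
instance (comp : List Int) (edges_in_comp : List (Int × Int)) (W : List (Int × Int)) (out : Bool) : Decidable (Spec_is_balanced_on_component comp edges_in_comp W out) := by unfold Spec_is_balanced_on_component; infer_instance

-- ===== CLAIM (what is proved, stated in full; the proofs are below) =====
def Claim_equal_is_balanced_on_component : Prop := ∀ (comp : List Int) (edges_in_comp : List (Int × Int)) (W : List (Int × Int)), Dom_is_balanced_on_component comp edges_in_comp W → Pre_is_balanced_on_component comp edges_in_comp W → Spec_is_balanced_on_component comp edges_in_comp W (is_balanced_on_component comp edges_in_comp W)

-- ===== LEMMAS AND PROOFS =====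

-- vertices reachable from root through the (undirected) edge list
inductive pvReach (edges : List (Int × Int)) (root : Int) : Int → Prop
  | base : pvReach edges root root
  | fwd {u v : Int} : pvReach edges root u → (u, v) ∈ edges → pvReach edges root v
  | bwd {u v : Int} : pvReach edges root u → (v, u) ∈ edges → pvReach edges root v

-- a consistent 2-coloring of the part of the graph reachable from root
def pvGood (edges W : List (Int × Int)) (root : Int) (f : Int → Int) : Prop :=
  f root = 0 ∧ (∀ x, f x = 0 ∨ f x = 1) ∧
  ∀ p ∈ edges, pvReach edges root p.1 →
    f p.2 = PySem.Int.bxor (f p.1) (pvFlip W p.1 p.2)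

def pvBal (edges W : List (Int × Int)) (root : Int) : Prop :=
  ∃ f, pvGood edges W root f

-- tiny xor facts on {0,1}
theorem pvFlip01 (W : List (Int × Int)) (u w : Int) : pvFlip W u w = 0 ∨ pvFlip W u w = 1 := by
  unfold pvFlip; split_ifs <;> simp

theorem pvXor01 (a b : Int) (ha : a = 0 ∨ a = 1) (hb : b = 0 ∨ b = 1) :
    PySem.Int.bxor a b = 0 ∨ PySem.Int.bxor a b = 1 := by
  rcases ha with rfl | rfl <;> rcases hb with rfl | rfl <;> decide

theorem pvXor_swap (a b fl : Int) (ha : a = 0 ∨ a = 1) (hb : b = 0 ∨ b = 1)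
    (hf : fl = 0 ∨ fl = 1) : a = PySem.Int.bxor b fl → b = PySem.Int.bxor a fl := by
  rcases ha with rfl | rfl <;> rcases hb with rfl | rfl <;> rcases hf with rfl | rfl <;> decide

theorem pvXor_eq (a b fl : Int) (ha : a = 0 ∨ a = 1) (hb : b = 0 ∨ b = 1)
    (hf : fl = 0 ∨ fl = 1) : b = PySem.Int.bxor a fl → PySem.Int.bxor a b = fl := by
  rcases ha with rfl | rfl <;> rcases hb with rfl | rfl <;> rcases hf with rfl | rfl <;> decide

theorem pvXor_eq' (a b fl : Int) (ha : a = 0 ∨ a = 1) (hb : b = 0 ∨ b = 1)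
    (hf : fl = 0 ∨ fl = 1) : PySem.Int.bxor a b = fl → b = PySem.Int.bxor a fl := by
  rcases ha with rfl | rfl <;> rcases hb with rfl | rfl <;> rcases hf with rfl | rfl <;> decide

theorem pvFlip_symm (W : List (Int × Int)) (u w : Int) : pvFlip W u w = pvFlip W w u := by
  unfold pvFlip
  rcases lt_trichotomy u w with h | h | h
  · simp [h, not_lt.2 h.le]
  · simp [h]
  · simp [h, not_lt.2 h.le]

-- on a good coloring every edge incident to a reachable vertex is consistent, in both directions
theorem pvGood_edge (edges W : List (Int × Int)) (root : Int) (f : Int → Int)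
    (hg : pvGood edges W root f) (u w : Int) (hu : pvReach edges root u)
    (he : (u, w) ∈ edges ∨ (w, u) ∈ edges) :
    f w = PySem.Int.bxor (f u) (pvFlip W u w) := by
  rcases hg with ⟨_, hval, hcons⟩
  rcases he with he | he
  · exact hcons (u, w) he hu
  · have hw : pvReach edges root w := pvReach.bwd hu he
    have := hcons (w, u) he hw
    rw [pvFlip_symm W u w]
    exact pvXor_swap _ _ _ (hval u) (hval w) (pvFlip01 W w u) this

-- the adjacency dict of A, characterised
theorem pvAdj_getD_foldl (l : List (Int × Int)) (d : PySem.Dict Int (List Int)) (u : Int) :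
    (l.foldl (fun d p => (d.modify p.1 [] (· ++ [p.2])).modify p.2 [] (· ++ [p.1])) d).getD u []
      = d.getD u [] ++ l.flatMap (fun p =>
          (if p.1 = u then [p.2] else []) ++ (if p.2 = u then [p.1] else [])) := by
  induction l generalizing d with
  | nil => simp
  | cons p l ih =>
    obtain ⟨a, b⟩ := p
    rw [List.foldl_cons, ih, List.flatMap_cons]
    have hstep : ((d.modify a [] (· ++ [b])).modify b [] (· ++ [a])).getD u []
        = d.getD u [] ++ ((if a = u then [b] else []) ++ (if b = u then [a] else [])) := by
      by_cases h1 : u = a <;> by_cases h2 : u = b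
      · subst h1; subst h2
        simp [PySem.Dict.getD_modify]
      · subst h1
        have h2' : ¬b = u := fun h => h2 h.symm
        simp [PySem.Dict.getD_modify, h2, h2']
      · subst h2
        have h1' : ¬a = u := fun h => h1 h.symm
        simp [PySem.Dict.getD_modify, h1, h1']
      · have h1' : ¬a = u := fun h => h1 h.symm
        have h2' : ¬b = u := fun h => h2 h.symm
        simp [PySem.Dict.getD_modify, h1, h2, h1', h2']
    rw [hstep]
    simp

theorem pvAdj_mem_iff (edges : List (Int × Int)) (u w : Int) :
    w ∈ (pvAdj edges).getD u [] ↔ (u, w) ∈ edges ∨ (w, u) ∈ edges := by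
  unfold pvAdj
  rw [pvAdj_getD_foldl]
  simp only [PySem.Dict.getD_empty, List.nil_append, List.mem_flatMap, List.mem_append]
  constructor
  · rintro ⟨p, hp, h⟩
    rcases h with h | h <;> split_ifs at h with hh <;> simp at h
    · left; subst h; rw [← hh]; simpa using hp
    · right; subst h; rw [← hh]; simpa using hp
  · rintro (h | h)
    · exact ⟨(u, w), h, Or.inl (by simp)⟩
    · exact ⟨(w, u), h, Or.inr (by simp)⟩

-- ===== A-side: balanced → A returns true =====

-- colored vertices are reachable and carry the colors of f
def pvJ (edges : List (Int × Int)) (root : Int) (f : Int → Int) (c : PySem.Dict Int Int) : Prop :=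
  ∀ x, c.contains x = true → pvReach edges root x ∧ c.get? x = some (f x)

theorem pvAInner_sound (edges W : List (Int × Int)) (root : Int) (f : Int → Int)
    (hg : pvGood edges W root f) (u : Int) :
    ∀ (ws : List Int) (c : PySem.Dict Int Int) (s : List Int),
      (∀ w ∈ ws, (u, w) ∈ edges ∨ (w, u) ∈ edges) →
      pvJ edges root f c → c.contains u = true → (∀ x ∈ s, c.contains x = true) →
      ∃ c' s', pvAInner W u ws c s = some (c', s') ∧ pvJ edges root f c' ∧
        (∀ x ∈ s', c'.contains x = true) := by
  intro ws
  induction ws with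
  | nil =>
    intro c s _ hJ _ hs
    exact ⟨c, s, rfl, hJ, hs⟩
  | cons w ws ih =>
    intro c s hws hJ hu hs
    have hreach_u : pvReach edges root u := (hJ u hu).1
    have hgetu : c.getD u 0 = f u := PySem.Dict.getD_of_get?_eq_some c 0 (hJ u hu).2
    have hfw : f w = PySem.Int.bxor (f u) (pvFlip W u w) :=
      pvGood_edge edges W root f hg u w hreach_u (hws w (List.mem_cons_self ..))
    have hexp : PySem.Int.bxor (c.getD u 0) (pvFlip W u w) = f w := by rw [hgetu, hfw]
    simp only [pvAInner]
    by_cases h1 : c.contains w = false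
    · rw [if_pos h1]
      have hreach_w : pvReach edges root w := by
        rcases hws w (List.mem_cons_self ..) with he | he
        · exact pvReach.fwd hreach_u he
        · exact pvReach.bwd hreach_u he
      have hJ' : pvJ edges root f
          (c.insert w (PySem.Int.bxor (c.getD u 0) (pvFlip W u w))) := by
        intro x hx
        by_cases hxw : x = w
        · subst hxw
          exact ⟨hreach_w, by rw [PySem.Dict.get?_insert_self, hexp]⟩
        · have hcx : c.contains x = true := by
            rw [PySem.Dict.contains_insert] at hx
            simpa [hxw] using hx
          exact ⟨(hJ x hcx).1, by
            rw [PySem.Dict.get?_insert_of_ne _ _ hxw]; exact (hJ x hcx).2⟩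
      have hu' : (c.insert w (PySem.Int.bxor (c.getD u 0) (pvFlip W u w))).contains u = true := by
        rw [PySem.Dict.contains_insert]; simp [hu]
      have hs' : ∀ x ∈ s ++ [w],
          (c.insert w (PySem.Int.bxor (c.getD u 0) (pvFlip W u w))).contains x = true := by
        intro x hx
        rw [PySem.Dict.contains_insert]
        rcases List.mem_append.1 hx with hx | hx
        · simp [hs x hx]
        · simp at hx; simp [hx]
      exact ih _ _ (fun x hx => hws x (List.mem_cons_of_mem _ hx)) hJ' hu' hs'
    · rw [if_neg h1]
      have hw : c.contains w = true := by simpa using h1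
      have hgw : c.getD w 0 = f w := PySem.Dict.getD_of_get?_eq_some c 0 (hJ w hw).2
      rw [if_neg (by rw [hgw, hexp]; simp)]
      exact ih _ _ (fun x hx => hws x (List.mem_cons_of_mem _ hx)) hJ hu hs

theorem pvALoop_sound (edges W : List (Int × Int)) (root : Int) (f : Int → Int)
    (hg : pvGood edges W root f) (adj : PySem.Dict Int (List Int)) (V : List Int)
    (hadj : ∀ u w, w ∈ adj.getD u [] → w ∈ V)
    (hadj2 : ∀ u w, w ∈ adj.getD u [] → (u, w) ∈ edges ∨ (w, u) ∈ edges)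
    (c : PySem.Dict Int Int) (s : List Int)
    (hJ : pvJ edges root f c) (hs : ∀ x ∈ s, c.contains x = true) :
    pvALoop W adj V hadj c s = true := by
  revert hJ hs
  fun_induction pvALoop W adj V hadj c s
  next h => intro _ _; rfl
  next c s h u s1 hm =>
    intro hJ hs
    exfalso
    have hu : c.contains u = true := hs u (List.getLast_mem h)
    have hs1 : ∀ x ∈ s1, c.contains x = true := fun x hx =>
      hs x (List.dropLast_subset _ hx)
    obtain ⟨c', s', heq, _, _⟩ :=
      pvAInner_sound edges W root f hg u (adj.getD u []) c s1
        (fun w hw => hadj2 u w hw) hJ hu hs1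
    rw [heq] at hm; cases hm
  next c s h u s1 c' s' hm ih =>
    intro hJ hs
    have hu : c.contains u = true := hs u (List.getLast_mem h)
    have hs1 : ∀ x ∈ s1, c.contains x = true := fun x hx =>
      hs x (List.dropLast_subset _ hx)
    obtain ⟨c'', s'', heq, hJ', hs''⟩ :=
      pvAInner_sound edges W root f hg u (adj.getD u []) c s1
        (fun w hw => hadj2 u w hw) hJ hu hs1
    rw [heq] at hm
    cases hm
    exact ih hJ' hs''

-- ===== A-side: A returns true → balanced =====

def pvInv (edges W : List (Int × Int)) (root : Int) (adj : PySem.Dict Int (List Int))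
    (c : PySem.Dict Int Int) (s : List Int) : Prop :=
  c.get? root = some 0 ∧
  (∀ x, c.contains x = true → pvReach edges root x) ∧
  (∀ x ∈ s, c.contains x = true) ∧
  (∀ x, c.getD x 0 = 0 ∨ c.getD x 0 = 1) ∧
  (∀ u, c.contains u = true → u ∈ s ∨
    ∀ w ∈ adj.getD u [], c.contains w = true ∧
      c.getD w 0 = PySem.Int.bxor (c.getD u 0) (pvFlip W u w))

theorem pvAInner_inv (edges W : List (Int × Int)) (root : Int) (u : Int) :
    ∀ (ws : List Int) (c : PySem.Dict Int Int) (s : List Int)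
      (c' : PySem.Dict Int Int) (s' : List Int),
      pvAInner W u ws c s = some (c', s') →
      (∀ w ∈ ws, (u, w) ∈ edges ∨ (w, u) ∈ edges) →
      c.contains u = true →
      (∀ x, c.getD x 0 = 0 ∨ c.getD x 0 = 1) →
      (∀ x, c.contains x = true → pvReach edges root x) →
      (∀ x, c.contains x = true → c'.contains x = true ∧ c'.get? x = c.get? x) ∧
      (∀ x, c'.contains x = true → c.contains x = true ∨ x ∈ s') ∧
      (∀ x ∈ s', x ∈ s ∨ c'.contains x = true) ∧
      (∀ x ∈ s, x ∈ s') ∧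
      (∀ w ∈ ws, c'.contains w = true ∧
        c'.getD w 0 = PySem.Int.bxor (c'.getD u 0) (pvFlip W u w)) ∧
      (∀ x, c'.getD x 0 = 0 ∨ c'.getD x 0 = 1) ∧
      (∀ x, c'.contains x = true → pvReach edges root x) := by
  intro ws
  induction ws with
  | nil =>
    intro c s c' s' h hws hu hval hreach
    simp only [pvAInner] at h
    cases h
    exact ⟨fun x hx => ⟨hx, rfl⟩, fun x hx => Or.inl hx, fun x hx => Or.inl hx,
      fun x hx => hx, fun v hv => by simp at hv, hval, hreach⟩
  | cons w ws ih =>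
    intro c s c' s' h hws hu hval hreach
    simp only [pvAInner] at h
    have hreach_u := hreach u hu
    have hflip01 := pvFlip01 W u w
    split_ifs at h with h1 h2
    · -- w freshly colored
      set e := PySem.Int.bxor (c.getD u 0) (pvFlip W u w) with he
      have hreach_w : pvReach edges root w := by
        rcases hws w (List.mem_cons_self ..) with heu | heu
        · exact pvReach.fwd hreach_u heu
        · exact pvReach.bwd hreach_u heu
      have hu1 : (c.insert w e).contains u = true := by
        rw [PySem.Dict.contains_insert]; simp [hu]
      have hval1 : ∀ x, (c.insert w e).getD x 0 = 0 ∨ (c.insert w e).getD x 0 = 1 := by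
        intro x
        rw [PySem.Dict.getD_insert]
        split_ifs with hxw
        · exact pvXor01 _ _ (hval u) hflip01
        · exact hval x
      have hreach1 : ∀ x, (c.insert w e).contains x = true → pvReach edges root x := by
        intro x hx
        by_cases hxw : x = w
        · subst hxw; exact hreach_w
        · rw [PySem.Dict.contains_insert] at hx
          exact hreach x (by simpa [hxw] using hx)
      obtain ⟨hext, hnew, hstk, hstk2, hws', hval', hreach'⟩ :=
        ih (c.insert w e) (s ++ [w]) c' s' h
          (fun x hx => hws x (List.mem_cons_of_mem _ hx)) hu1 hval1 hreach1
      have hextc : ∀ x, c.contains x = true → c'.contains x = true ∧ c'.get? x = c.get? x := by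
        intro x hx
        have hxw : x ≠ w := fun hh => by rw [hh] at hx; rw [hx] at h1; cases h1
        have h1' := hext x (by rw [PySem.Dict.contains_insert]; simp [hx])
        exact ⟨h1'.1, by rw [h1'.2, PySem.Dict.get?_insert_of_ne _ _ hxw]⟩
      have hgetu' : c'.getD u 0 = c.getD u 0 := by
        rw [PySem.Dict.getD_eq_get?_getD, (hextc u hu).2, ← PySem.Dict.getD_eq_get?_getD]
      refine ⟨hextc, ?_, ?_, ?_, ?_, hval', hreach'⟩
      · intro x hx
        rcases hnew x hx with hx1 | hx1
        · have hx1' : x = w ∨ c.contains x = true := by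
            rw [PySem.Dict.contains_insert] at hx1
            simpa using hx1
          rcases hx1' with hx2 | hx2
          · right
            subst hx2
            exact hstk2 _ (by simp)
          · left; exact hx2
        · right; exact hx1
      · intro x hx
        rcases hstk x hx with hx1 | hx1
        · rcases List.mem_append.1 hx1 with hx2 | hx2
          · exact Or.inl hx2
          · right
            have hxw : x = w := by simpa using hx2
            subst hxw
            exact (hext x (by rw [PySem.Dict.contains_insert]; simp)).1
        · exact Or.inr hx1
      · intro x hx; exact hstk2 x (List.mem_append_left _ hx)
      · intro v hv
        rcases List.mem_cons.1 hv with rfl | hv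
        · have hcw : (c.insert v e).contains v = true := PySem.Dict.contains_insert_self ..
          have h2' := hext v hcw
          refine ⟨h2'.1, ?_⟩
          rw [PySem.Dict.getD_eq_get?_getD, h2'.2, PySem.Dict.get?_insert_self,
            Option.getD_some, hgetu']
        · exact hws' v hv
    · -- w already colored and consistent
      have hcw : c.contains w = true := by simpa using h1
      push Not at h2
      obtain ⟨hext, hnew, hstk, hstk2, hws', hval', hreach'⟩ :=
        ih c s c' s' h (fun x hx => hws x (List.mem_cons_of_mem _ hx)) hu hval hreach
      refine ⟨hext, hnew, hstk, hstk2, ?_, hval', hreach'⟩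
      intro v hv
      rcases List.mem_cons.1 hv with rfl | hv
      · have h2' := hext v hcw
        refine ⟨h2'.1, ?_⟩
        have hgw : c'.getD v 0 = c.getD v 0 := by
          rw [PySem.Dict.getD_eq_get?_getD, h2'.2, ← PySem.Dict.getD_eq_get?_getD]
        have hgu : c'.getD u 0 = c.getD u 0 := by
          rw [PySem.Dict.getD_eq_get?_getD, (hext u hu).2, ← PySem.Dict.getD_eq_get?_getD]
        rw [hgw, hgu]
        exact h2
      · exact hws' v hv

theorem pvALoop_inv (edges W : List (Int × Int)) (root : Int)
    (adj : PySem.Dict Int (List Int)) (V : List Int)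
    (hadj : ∀ u w, w ∈ adj.getD u [] → w ∈ V)
    (hadj2 : ∀ u w, w ∈ adj.getD u [] → (u, w) ∈ edges ∨ (w, u) ∈ edges)
    (hadj3 : ∀ u w, (u, w) ∈ edges ∨ (w, u) ∈ edges → w ∈ adj.getD u [])
    (c : PySem.Dict Int Int) (s : List Int)
    (hInv : pvInv edges W root adj c s)
    (htrue : pvALoop W adj V hadj c s = true) :
    pvBal edges W root := by
  revert hInv htrue
  fun_induction pvALoop W adj V hadj c s
  next c =>
    intro hInv _
    obtain ⟨hroot, hreach, _, hval, hclo⟩ := hInv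
    have hcroot : c.contains root = true := by
      rw [PySem.Dict.contains_eq_isSome_get?, hroot]; rfl
    have hclosed : ∀ x, pvReach edges root x → c.contains x = true := by
      intro x hx
      induction hx with
      | base => exact hcroot
      | fwd hu he ihh =>
        rcases hclo _ ihh with hmem | hcl
        · simp at hmem
        · exact (hcl _ (hadj3 _ _ (Or.inl he))).1
      | bwd hu he ihh =>
        rcases hclo _ ihh with hmem | hcl
        · simp at hmem
        · exact (hcl _ (hadj3 _ _ (Or.inr he))).1
    refine ⟨fun x => c.getD x 0, ?_, hval, ?_⟩
    · show c.getD root 0 = 0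
      rw [PySem.Dict.getD_eq_get?_getD, hroot]; rfl
    · intro p hp hr
      show c.getD p.2 0 = PySem.Int.bxor (c.getD p.1 0) (pvFlip W p.1 p.2)
      have hc1 : c.contains p.1 = true := hclosed _ hr
      rcases hclo _ hc1 with hmem | hcl
      · simp at hmem
      · exact (hcl _ (hadj3 _ _ (Or.inl hp))).2
  next c s h u s1 hm =>
    intro _ ht
    cases ht
  next c s h u s1 c' s' hm ih =>
    intro hInv htrue
    obtain ⟨hroot, hreach, hstack, hval, hclo⟩ := hInv
    have hu : c.contains u = true := hstack u (List.getLast_mem h)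
    have hu0 : pvReach edges root u := hreach u hu
    obtain ⟨hext, hnew, hstk, hstk2, hwsall, hval', hreach'⟩ :=
      pvAInner_inv edges W root u (adj.getD u []) c s1 c' s' hm
        (fun w hw => hadj2 u w hw) hu hval hreach
    have hcroot : c.contains root = true := by
      rw [PySem.Dict.contains_eq_isSome_get?, hroot]; rfl
    have hsplit : ∀ x ∈ s, x ∈ s1 ∨ x = u := by
      intro x hx
      rw [← List.dropLast_append_getLast h] at hx
      rcases List.mem_append.1 hx with hx | hx
      · exact Or.inl hx
      · right; simpa using hx
    refine ih ⟨?_, hreach', ?_, hval', ?_⟩ htrue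
    · rw [(hext root hcroot).2]; exact hroot
    · intro x hx
      rcases hstk x hx with hx1 | hx1
      · exact (hext x (hstack x (List.dropLast_subset _ hx1))).1
      · exact hx1
    · intro v hv
      rcases hnew v hv with hcv | hv' 
      swap
      · exact Or.inl hv'
      rcases hclo v hcv with hvs | hcl
      · rcases hsplit v hvs with hv1 | hv1
        · exact Or.inl (hstk2 v hv1)
        · subst hv1
          right
          intro w hw
          exact hwsall w hw
      · right
        intro w hw
        have h1 := hcl w hw
        refine ⟨(hext w h1.1).1, ?_⟩
        have hgw : c'.getD w 0 = c.getD w 0 := by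
          rw [PySem.Dict.getD_eq_get?_getD, (hext w h1.1).2, ← PySem.Dict.getD_eq_get?_getD]
        have hgv : c'.getD v 0 = c.getD v 0 := by
          rw [PySem.Dict.getD_eq_get?_getD, (hext v hcv).2, ← PySem.Dict.getD_eq_get?_getD]
        rw [hgw, hgv]
        exact h1.2

-- ===== B-side: balanced → B returns true =====

theorem pvBPass_foldl_sound (edges W : List (Int × Int)) (root : Int) (f : Int → Int)
    (hg : pvGood edges W root f) :
    ∀ (l : List (Int × Int)) (c : PySem.Dict Int Int) (b : Bool),
      (∀ p ∈ l, p ∈ edges) → pvJ edges root f c →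
      pvJ edges root f (l.foldl (pvBStep W) (c, b)).1 := by
  intro l
  induction l with
  | nil => intro c b _ hJ; exact hJ
  | cons p l ih =>
    intro c b hl hJ
    rw [List.foldl_cons]
    have hmem : p ∈ edges := hl p (List.mem_cons_self ..)
    have hmem' : (p.1, p.2) ∈ edges := by simpa using hmem
    have hl' : ∀ q ∈ l, q ∈ edges := fun q hq => hl q (List.mem_cons_of_mem _ hq)
    by_cases h1 : (c.contains p.1 && !c.contains p.2) = true
    · rw [show pvBStep W (c, b) p
          = (c.insert p.2 (PySem.Int.bxor (c.getD p.1 0) (pvFlip W p.1 p.2)), true) from by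
        simp [pvBStep, h1]]
      apply ih _ _ hl'
      simp only [Bool.and_eq_true, Bool.not_eq_true'] at h1
      have hr1 : pvReach edges root p.1 := (hJ _ h1.1).1
      have hg1 : c.getD p.1 0 = f p.1 := PySem.Dict.getD_of_get?_eq_some c 0 (hJ _ h1.1).2
      have hf2 : f p.2 = PySem.Int.bxor (f p.1) (pvFlip W p.1 p.2) :=
        pvGood_edge edges W root f hg p.1 p.2 hr1 (Or.inl hmem')
      intro x hx
      by_cases hxw : x = p.2
      · subst hxw
        exact ⟨pvReach.fwd hr1 hmem', by rw [PySem.Dict.get?_insert_self, hg1, ← hf2]⟩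
      · have hcx : c.contains x = true := by
          rw [PySem.Dict.contains_insert] at hx; simpa [hxw] using hx
        exact ⟨(hJ x hcx).1, by
          rw [PySem.Dict.get?_insert_of_ne _ _ hxw]; exact (hJ x hcx).2⟩
    · by_cases h2 : (c.contains p.2 && !c.contains p.1) = true
      · rw [show pvBStep W (c, b) p
            = (c.insert p.1 (PySem.Int.bxor (c.getD p.2 0) (pvFlip W p.1 p.2)), true) from by
          simp [pvBStep, h1, h2]]
        apply ih _ _ hl'
        simp only [Bool.and_eq_true, Bool.not_eq_true'] at h2
        have hr2 : pvReach edges root p.2 := (hJ _ h2.1).1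
        have hg2 : c.getD p.2 0 = f p.2 := PySem.Dict.getD_of_get?_eq_some c 0 (hJ _ h2.1).2
        have hr1 : pvReach edges root p.1 := pvReach.bwd hr2 hmem'
        have hf1 : f p.1 = PySem.Int.bxor (f p.2) (pvFlip W p.1 p.2) := by
          have h3 := pvGood_edge edges W root f hg p.2 p.1 hr2 (Or.inr hmem')
          rwa [pvFlip_symm W p.2 p.1] at h3
        intro x hx
        by_cases hxw : x = p.1
        · subst hxw
          exact ⟨hr1, by rw [PySem.Dict.get?_insert_self, hg2, ← hf1]⟩
        · have hcx : c.contains x = true := by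
            rw [PySem.Dict.contains_insert] at hx; simpa [hxw] using hx
          exact ⟨(hJ x hcx).1, by
            rw [PySem.Dict.get?_insert_of_ne _ _ hxw]; exact (hJ x hcx).2⟩
      · rw [show pvBStep W (c, b) p = (c, b) from by simp [pvBStep, h1, h2]]
        exact ih c b hl' hJ

theorem pvBLoop_sound (edges W : List (Int × Int)) (root : Int) (f : Int → Int)
    (hg : pvGood edges W root f) (c : PySem.Dict Int Int)
    (hJ : pvJ edges root f c) : pvJ edges root f (pvBLoop W edges c) := by
  revert hJ
  fun_induction pvBLoop W edges c
  next c r h ih =>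
    intro hJ
    exact ih (pvBPass_foldl_sound edges W root f hg edges c false (fun q hq => hq) hJ)
  next c r h =>
    intro hJ
    exact pvBPass_foldl_sound edges W root f hg edges c false (fun q hq => hq) hJ

theorem pvBCheck_sound (edges W : List (Int × Int)) (root : Int) (f : Int → Int)
    (hg : pvGood edges W root f) (c : PySem.Dict Int Int)
    (hJ : pvJ edges root f c) : pvBCheck W edges c = true := by
  unfold pvBCheck
  rw [List.all_eq_true]
  intro p hp
  by_cases hb : (c.contains p.1 && c.contains p.2) = true
  · rw [if_pos hb, decide_eq_true_eq]
    simp only [Bool.and_eq_true] at hb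
    have hg1 : c.getD p.1 0 = f p.1 := PySem.Dict.getD_of_get?_eq_some c 0 (hJ _ hb.1).2
    have hg2 : c.getD p.2 0 = f p.2 := PySem.Dict.getD_of_get?_eq_some c 0 (hJ _ hb.2).2
    have hf2 : f p.2 = PySem.Int.bxor (f p.1) (pvFlip W p.1 p.2) :=
      pvGood_edge edges W root f hg p.1 p.2 (hJ _ hb.1).1 (Or.inl (by simpa using hp))
    rw [hg1, hg2]
    exact pvXor_eq _ _ _ (hg.2.1 p.1) (hg.2.1 p.2) (pvFlip01 W p.1 p.2) hf2
  · rw [if_neg hb]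

-- ===== B-side: B returns true → balanced =====

def pvL (edges : List (Int × Int)) (root : Int) (c : PySem.Dict Int Int) : Prop :=
  c.get? root = some 0 ∧
  (∀ x, c.contains x = true → pvReach edges root x) ∧
  (∀ x, c.getD x 0 = 0 ∨ c.getD x 0 = 1)

theorem pvBPass_foldl_linv (edges W : List (Int × Int)) (root : Int) :
    ∀ (l : List (Int × Int)) (c : PySem.Dict Int Int) (b : Bool),
      (∀ p ∈ l, p ∈ edges) → pvL edges root c →
      pvL edges root (l.foldl (pvBStep W) (c, b)).1 := by
  intro l
  induction l with
  | nil => intro c b _ hL; exact hL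
  | cons p l ih =>
    intro c b hl hL
    obtain ⟨hroot, hreach, hval⟩ := hL
    have hcroot : c.contains root = true := by
      rw [PySem.Dict.contains_eq_isSome_get?, hroot]; rfl
    have hmem' : (p.1, p.2) ∈ edges := by simpa using hl p (List.mem_cons_self ..)
    have hl' : ∀ q ∈ l, q ∈ edges := fun q hq => hl q (List.mem_cons_of_mem _ hq)
    rw [List.foldl_cons]
    by_cases h1 : (c.contains p.1 && !c.contains p.2) = true
    · rw [show pvBStep W (c, b) p
          = (c.insert p.2 (PySem.Int.bxor (c.getD p.1 0) (pvFlip W p.1 p.2)), true) from by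
        simp [pvBStep, h1]]
      apply ih _ _ hl'
      simp only [Bool.and_eq_true, Bool.not_eq_true'] at h1
      have hne : root ≠ p.2 := fun hh => by rw [← hh] at h1; rw [hcroot] at h1; cases h1.2
      refine ⟨by rw [PySem.Dict.get?_insert_of_ne _ _ hne]; exact hroot, ?_, ?_⟩
      · intro x hx
        by_cases hxw : x = p.2
        · subst hxw; exact pvReach.fwd (hreach _ h1.1) hmem'
        · rw [PySem.Dict.contains_insert] at hx
          exact hreach x (by simpa [hxw] using hx)
      · intro x
        rw [PySem.Dict.getD_insert]
        split_ifs with hxw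
        · exact pvXor01 _ _ (hval p.1) (pvFlip01 W p.1 p.2)
        · exact hval x
    · by_cases h2 : (c.contains p.2 && !c.contains p.1) = true
      · rw [show pvBStep W (c, b) p
            = (c.insert p.1 (PySem.Int.bxor (c.getD p.2 0) (pvFlip W p.1 p.2)), true) from by
          simp [pvBStep, h1, h2]]
        apply ih _ _ hl'
        simp only [Bool.and_eq_true, Bool.not_eq_true'] at h2
        have hne : root ≠ p.1 := fun hh => by rw [← hh] at h2; rw [hcroot] at h2; cases h2.2
        refine ⟨by rw [PySem.Dict.get?_insert_of_ne _ _ hne]; exact hroot, ?_, ?_⟩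
        · intro x hx
          by_cases hxw : x = p.1
          · subst hxw; exact pvReach.bwd (hreach _ h2.1) hmem'
          · rw [PySem.Dict.contains_insert] at hx
            exact hreach x (by simpa [hxw] using hx)
        · intro x
          rw [PySem.Dict.getD_insert]
          split_ifs with hxw
          · exact pvXor01 _ _ (hval p.2) (pvFlip01 W p.1 p.2)
          · exact hval x
      · rw [show pvBStep W (c, b) p = (c, b) from by simp [pvBStep, h1, h2]]
        exact ih c b hl' ⟨hroot, hreach, hval⟩

theorem pvBStep_flag (W : List (Int × Int)) :
    ∀ (l : List (Int × Int)) (st : PySem.Dict Int Int × Bool),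
      st.2 = true → (l.foldl (pvBStep W) st).2 = true := by
  intro l
  induction l with
  | nil => intro st h; simpa using h
  | cons p l ih =>
    intro st h
    rw [List.foldl_cons]
    apply ih
    simp only [pvBStep]
    split_ifs <;> simp [h]

theorem pvBPass_foldl_fix (W : List (Int × Int)) :
    ∀ (l : List (Int × Int)) (c : PySem.Dict Int Int),
      (l.foldl (pvBStep W) (c, false)).2 = false →
      (l.foldl (pvBStep W) (c, false)).1 = c ∧
        ∀ p ∈ l, c.contains p.1 = c.contains p.2 := by
  intro l
  induction l with
  | nil => intro c _; exact ⟨rfl, by simp⟩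
  | cons p l ih =>
    intro c h
    rw [List.foldl_cons] at h ⊢
    by_cases h1 : (c.contains p.1 && !c.contains p.2) = true
    · exfalso
      rw [show pvBStep W (c, false) p
          = (c.insert p.2 (PySem.Int.bxor (c.getD p.1 0) (pvFlip W p.1 p.2)), true) from by
        simp [pvBStep, h1]] at h
      have := pvBStep_flag W l _ (rfl :
        ((c.insert p.2 (PySem.Int.bxor (c.getD p.1 0) (pvFlip W p.1 p.2)), true) :
          PySem.Dict Int Int × Bool).2 = true)
      rw [this] at h
      cases h
    · by_cases h2 : (c.contains p.2 && !c.contains p.1) = true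
      · exfalso
        rw [show pvBStep W (c, false) p
            = (c.insert p.1 (PySem.Int.bxor (c.getD p.2 0) (pvFlip W p.1 p.2)), true) from by
          simp [pvBStep, h1, h2]] at h
        have := pvBStep_flag W l _ (rfl :
          ((c.insert p.1 (PySem.Int.bxor (c.getD p.2 0) (pvFlip W p.1 p.2)), true) :
            PySem.Dict Int Int × Bool).2 = true)
        rw [this] at h
        cases h
      · rw [show pvBStep W (c, false) p = (c, false) from by simp [pvBStep, h1, h2]] at h ⊢
        obtain ⟨hc, hl⟩ := ih c h
        refine ⟨hc, ?_⟩
        intro q hq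
        rcases List.mem_cons.1 hq with rfl | hq
        · cases hp1 : c.contains q.1 <;> cases hp2 : c.contains q.2 <;> simp_all
        · exact hl q hq

theorem pvBLoop_linv (edges W : List (Int × Int)) (root : Int)
    (c : PySem.Dict Int Int) (hL : pvL edges root c) :
    pvL edges root (pvBLoop W edges c) ∧
      ∀ p ∈ edges, (pvBLoop W edges c).contains p.1 = (pvBLoop W edges c).contains p.2 := by
  revert hL
  fun_induction pvBLoop W edges c
  next c r h ih =>
    intro hL
    exact ih (pvBPass_foldl_linv edges W root edges c false (fun q hq => hq) hL)
  next c r h =>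
    intro hL
    have hfalse : (edges.foldl (pvBStep W) (c, false)).2 = false := by
      simpa [pvBPass] using h
    obtain ⟨hc, hfix⟩ := pvBPass_foldl_fix W edges c hfalse
    have hr1 : r.1 = c := hc
    rw [hr1]
    exact ⟨hL, hfix⟩

theorem pvB_true_bal (edges W : List (Int × Int)) (root : Int)
    (c : PySem.Dict Int Int) (hL : pvL edges root c)
    (hfix : ∀ p ∈ edges, c.contains p.1 = c.contains p.2)
    (hchk : pvBCheck W edges c = true) : pvBal edges W root := by
  obtain ⟨hroot, hreach, hval⟩ := hL
  have hcroot : c.contains root = true := by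
    rw [PySem.Dict.contains_eq_isSome_get?, hroot]; rfl
  have hclosed : ∀ x, pvReach edges root x → c.contains x = true := by
    intro x hx
    induction hx with
    | base => exact hcroot
    | fwd hu he ihh => rw [← hfix _ he]; exact ihh
    | bwd hu he ihh => rw [hfix _ he]; exact ihh
  unfold pvBCheck at hchk
  rw [List.all_eq_true] at hchk
  refine ⟨fun x => c.getD x 0, ?_, hval, ?_⟩
  · show c.getD root 0 = 0
    rw [PySem.Dict.getD_eq_get?_getD, hroot]; rfl
  · intro p hp hr
    show c.getD p.2 0 = PySem.Int.bxor (c.getD p.1 0) (pvFlip W p.1 p.2)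
    have hc1 : c.contains p.1 = true := hclosed _ hr
    have hc2 : c.contains p.2 = true := by rw [← hfix p hp]; exact hc1
    have h3 := hchk p hp
    rw [if_pos (by rw [hc1, hc2]; rfl), decide_eq_true_eq] at h3
    exact pvXor_eq' _ _ _ (hval p.1) (hval p.2) (pvFlip01 W p.1 p.2) h3

-- ===== assembly =====

theorem pvA_eq_true_iff (edges W : List (Int × Int)) (comp : List Int) (root : Int)
    (hroot : pvSetFirst comp = some root) :
    is_balanced_on_component comp edges W = true ↔ pvBal edges W root := by
  unfold is_balanced_on_component
  rw [hroot]
  have hInv0 : pvInv edges W root (pvAdj edges)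
      (PySem.Dict.empty.insert root 0) [root] := by
    refine ⟨PySem.Dict.get?_insert_self .., ?_, ?_, ?_, ?_⟩
    · intro x hx
      have : x = root := by
        rw [PySem.Dict.contains_insert] at hx
        simpa [PySem.Dict.contains_empty] using hx
      subst this; exact pvReach.base
    · intro x hx
      have : x = root := by simpa using hx
      subst this; exact PySem.Dict.contains_insert_self ..
    · intro x
      rw [PySem.Dict.getD_insert]
      split_ifs
      · exact Or.inl rfl
      · left; rw [PySem.Dict.getD_empty]
    · intro u hu
      left
      have : u = root := by
        rw [PySem.Dict.contains_insert] at hu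
        simpa [PySem.Dict.contains_empty] using hu
      simp [this]
  constructor
  · intro h
    exact pvALoop_inv edges W root (pvAdj edges) (pvVerts edges)
      (fun u w hw => pvAdj_mem edges u w hw)
      (fun u w hw => (pvAdj_mem_iff edges u w).1 hw)
      (fun u w hw => (pvAdj_mem_iff edges u w).2 hw)
      _ _ hInv0 h
  · rintro ⟨f, hg⟩
    have hJ0 : pvJ edges root f (PySem.Dict.empty.insert root 0) := by
      intro x hx
      have : x = root := by
        rw [PySem.Dict.contains_insert] at hx
        simpa [PySem.Dict.contains_empty] using hx
      subst this
      exact ⟨pvReach.base, by rw [PySem.Dict.get?_insert_self, hg.1]⟩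
    have hs0 : ∀ x ∈ [root], (PySem.Dict.empty.insert root 0).contains x = true := by
      intro x hx
      have hxr : x = root := by simpa using hx
      subst hxr
      exact PySem.Dict.contains_insert_self ..
    exact pvALoop_sound edges W root f hg (pvAdj edges) (pvVerts edges)
      (fun u w hw => pvAdj_mem edges u w hw)
      (fun u w hw => (pvAdj_mem_iff edges u w).1 hw)
      _ _ hJ0 hs0

theorem pvB_eq_true_iff (edges W : List (Int × Int)) (comp : List Int) (root : Int)
    (hroot : pvSetFirst comp = some root) :
    is_balanced_on_component_alt comp edges W = true ↔ pvBal edges W root := by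
  unfold is_balanced_on_component_alt
  rw [hroot]
  constructor
  · intro h
    have hL0 : pvL edges root (PySem.Dict.empty.insert root 0) := by
      refine ⟨PySem.Dict.get?_insert_self .., ?_, ?_⟩
      · intro x hx
        have : x = root := by
          rw [PySem.Dict.contains_insert] at hx
          simpa [PySem.Dict.contains_empty] using hx
        subst this; exact pvReach.base
      · intro x
        rw [PySem.Dict.getD_insert]
        split_ifs
        · exact Or.inl rfl
        · left; rw [PySem.Dict.getD_empty]
    obtain ⟨hL, hfix⟩ := pvBLoop_linv edges W root _ hL0
    exact pvB_true_bal edges W root _ hL hfix h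
  · rintro ⟨f, hg⟩
    have hJ0 : pvJ edges root f (PySem.Dict.empty.insert root 0) := by
      intro x hx
      have : x = root := by
        rw [PySem.Dict.contains_insert] at hx
        simpa [PySem.Dict.contains_empty] using hx
      subst this
      exact ⟨pvReach.base, by rw [PySem.Dict.get?_insert_self, hg.1]⟩
    exact pvBCheck_sound edges W root f hg _
      (pvBLoop_sound edges W root f hg _ hJ0)

-- ===== VERDICT (by name: the statement is the Claim_ definition above) =====
theorem is_balanced_on_component_spec : Claim_equal_is_balanced_on_component := by
  intro comp edges W _ _
  unfold Spec_is_balanced_on_component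
  cases hroot : pvSetFirst comp with
  | none =>
    unfold is_balanced_on_component is_balanced_on_component_alt
    rw [hroot]
  | some root =>
    have h1 := pvA_eq_true_iff edges W comp root hroot
    have h2 := pvB_eq_true_iff edges W comp root hroot
    cases hA : is_balanced_on_component comp edges W
    · cases hB : is_balanced_on_component_alt comp edges W
      · rfl
      · rw [← hA]
        exact h1.2 (h2.1 hB)
    · exact (h2.2 (h1.1 hA)).symm
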